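-- pv_equiv track=rewrite | github.com/mrveiss/AutoBot-AI | backend/api/codebase_analytics/endpoints/report.py | _group_problems
-- ===== SOURCE A (Python) =====
-- from typing import Dict, List, Optional
--
-- def _group_problems(problems: List[Dict]) -> Dict[str, Dict[str, List[Dict]]]:
--     """
--     Group problems by severity, then by issue type.
--
--     Returns:
--         {
--             "high": {
--                 "race_condition": [problem1, problem2],
--                 "parse_error": [problem3],
--             },
--             "medium": {...},
--             ...
--         }
--     """
--     grouped: Dict[str, Dict[str, List[Dict]]] = {}
--
--     for problem in problems:
--         severity = problem.get("severity", "low").lower()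
--         issue_type = problem.get("type", "unknown")
--
--         if severity not in grouped:
--             grouped[severity] = {}
--         if issue_type not in grouped[severity]:
--             grouped[severity][issue_type] = []
--
--         grouped[severity][issue_type].append(problem)
--
--     return grouped
-- ===== SOURCE B (Python) =====
-- from typing import Dict, List
--
-- def _group_problems(problems: List[Dict]) -> Dict[str, Dict[str, List[Dict]]]:
--     # Index-then-emit: compute each problem's (severity, type) key once, then build the
--     # nested dict with comprehensions over the first-occurrence-ordered distinct keys.
--     keys = [(p.get("severity", "low").lower(), p.get("type", "unknown")) for p in problems]
--     pairs = list(zip(keys, problems))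
--     return {
--         s: {
--             t: [p for (k, p) in pairs if k == (s, t)]
--             for t in dict.fromkeys(t2 for (s2, t2) in keys if s2 == s)
--         }
--         for s in dict.fromkeys(s for (s, _) in keys)
--     }
-- ===== Notes on version B (the rewrite author's own statement) =====
-- stated objective: alternative
-- what changed: B computes each problem's (severity, type) key once up front, takes the distinct severities and per-severity types in first-occurrence order, and emits each group with one filtered comprehension, instead of A's item-by-item insertion into a nested dict.
import Mathlib
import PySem

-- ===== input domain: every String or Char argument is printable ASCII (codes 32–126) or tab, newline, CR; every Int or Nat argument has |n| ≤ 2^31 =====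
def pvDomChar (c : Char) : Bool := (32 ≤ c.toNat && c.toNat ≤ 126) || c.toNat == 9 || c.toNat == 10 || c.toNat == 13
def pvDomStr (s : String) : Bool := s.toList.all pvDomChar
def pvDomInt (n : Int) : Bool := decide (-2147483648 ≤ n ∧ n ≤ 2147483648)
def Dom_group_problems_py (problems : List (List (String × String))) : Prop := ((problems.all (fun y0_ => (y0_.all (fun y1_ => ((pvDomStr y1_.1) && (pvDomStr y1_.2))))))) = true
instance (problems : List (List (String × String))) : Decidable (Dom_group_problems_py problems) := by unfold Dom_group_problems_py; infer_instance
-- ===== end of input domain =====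

-- B groups by indexing first (distinct (severity, type) keys in first-occurrence order, then one
-- filtered emission per key) instead of A's item-by-item nested-dict insertion; objective:
-- alternative decomposition, same output.

-- ===== PORT A =====
-- problem.get(k, dflt): first-match lookup on the association list (Python dict)
def pvGetStr (p : List (String × String)) (k dflt : String) : String :=
  (PySem.Dict.mk p).getD k dflt

-- the body of A's for-loop, as a fold step
def pvStepA (grouped : PySem.Dict String (PySem.Dict String (List (List (String × String)))))
    (problem : List (String × String)) :
    PySem.Dict String (PySem.Dict String (List (List (String × String)))) :=
  let severity := PySem.Str.lower (pvGetStr problem "severity" "low")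
  let issue_type := pvGetStr problem "type" "unknown"
  let grouped := if grouped.contains severity then grouped else grouped.insert severity PySem.Dict.empty
  let inner := grouped.getD severity PySem.Dict.empty
  let inner := if inner.contains issue_type then inner else inner.insert issue_type []
  let inner := inner.modify issue_type [] (fun l => l ++ [problem])
  grouped.insert severity inner

def group_problems_py (problems : List (List (String × String))) :
    List (String × List (String × List (List (String × String)))) :=
  ((problems.foldl pvStepA PySem.Dict.empty).items).map (fun si => (si.1, si.2.items))

-- ===== PORT B =====
-- the (severity, type) key of one problem
def pvKey (p : List (String × String)) : String × String :=
  (PySem.Str.lower (pvGetStr p "severity" "low"), pvGetStr p "type" "unknown")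


-- [p for (k, p) in pairs if k == (s, t)]
def pvEntry (pairs : List ((String × String) × List (String × String))) (s t : String) :
    List (List (String × String)) :=
  (pairs.filter (fun kp => kp.1 == (s, t))).map (·.2)


-- the inner dict comprehension for one severity s
def pvInnerB (keys : List (String × String))
    (pairs : List ((String × String) × List (String × String))) (s : String) :
    List (String × List (List (String × String))) :=
  (PySem.List.dedup ((keys.filter (fun k => k.1 == s)).map (·.2))).map (fun t => (t, pvEntry pairs s t))


def group_problems_py_alt (problems : List (List (String × String))) :
    List (String × List (String × List (List (String × String)))) :=
  let keys := problems.map pvKey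
  let pairs := keys.zip problems
  (PySem.List.dedup (keys.map (·.1))).map (fun s => (s, pvInnerB keys pairs s))

-- ===== PRECONDITION & SPEC =====
def Spec_group_problems_py (problems : List (List (String × String))) (out : List (String × List (String × List (List (String × String))))) : Prop := out = group_problems_py_alt problems
instance (problems : List (List (String × String))) (out : List (String × List (String × List (List (String × String))))) : Decidable (Spec_group_problems_py problems out) := by
  unfold Spec_group_problems_py
  letI i3 : DecidableEq (List (String × List (List (String × String)))) := inferInstance
  letI i5 : DecidableEq (List (String × List (String × List (List (String × String))))) := inferInstance
  infer_instance

-- ===== CLAIM (what is proved, stated in full; the proofs are below) =====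
def Claim_equal_group_problems_py : Prop := ∀ (problems : List (List (String × String))), Dom_group_problems_py problems → Spec_group_problems_py problems (group_problems_py problems)

-- ===== LEMMAS AND PROOFS =====

def pvSev (p : List (String × String)) : String := PySem.Str.lower (pvGetStr p "severity" "low")
def pvTyp (p : List (String × String)) : String := pvGetStr p "type" "unknown"

theorem pvStepA_norm (d : PySem.Dict String (PySem.Dict String (List (List (String × String)))))
    (p : List (String × String)) :
    pvStepA d p
      = d.insert (pvSev p) ((d.getD (pvSev p) PySem.Dict.empty).modify (pvTyp p) []
          (fun l => l ++ [p])) := by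
  simp only [pvStepA, PySem.Dict.modify, pvSev, pvTyp]
  by_cases h1 : d.contains (PySem.Str.lower (pvGetStr p "severity" "low")) = true
  · simp only [h1, if_true]
    by_cases h2 : (d.getD (PySem.Str.lower (pvGetStr p "severity" "low")) PySem.Dict.empty).contains (pvGetStr p "type" "unknown") = true
    · simp only [h2, if_true]
    · have h2' : (d.getD (PySem.Str.lower (pvGetStr p "severity" "low")) PySem.Dict.empty).contains (pvGetStr p "type" "unknown") = false := by simpa using h2
      simp only [h2', Bool.false_eq_true, if_false, PySem.Dict.getD_insert_self,
        PySem.Dict.insert_insert_self, PySem.Dict.getD_of_not_contains _ _ h2']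
  · have h1' : d.contains (PySem.Str.lower (pvGetStr p "severity" "low")) = false := by simpa using h1
    simp only [h1', Bool.false_eq_true, if_false, PySem.Dict.getD_insert_self,
      PySem.Dict.contains_empty, PySem.Dict.insert_insert_self,
      PySem.Dict.getD_of_not_contains _ _ h1', PySem.Dict.getD_empty]

theorem pv_dedup_append_singleton {α : Type} [BEq α] [LawfulBEq α] (l : List α) (x : α) :
    PySem.List.dedup (l ++ [x])
      = if x ∈ l then PySem.List.dedup l else PySem.List.dedup l ++ [x] := by
  have h : PySem.List.dedup (l ++ [x]) = PySem.Set.add (PySem.Set.ofList l) x := by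
    simp [PySem.List.dedup_eq_ofList, PySem.Set.ofList_eq_foldl, List.foldl_append]
  rw [h, PySem.Set.add]
  by_cases hx : x ∈ l
  · simp [hx, PySem.Set.contains, PySem.Set.mem_ofList, PySem.List.dedup_eq_ofList]
  · simp [hx, PySem.Set.contains, PySem.Set.mem_ofList, PySem.List.dedup_eq_ofList]

theorem pv_foldl_eq (ps : List (List (String × String)))
    (d : PySem.Dict String (PySem.Dict String (List (List (String × String))))) :
    ps.foldl pvStepA d
      = ps.foldl (fun d p => d.insert (pvSev p)
          ((d.getD (pvSev p) PySem.Dict.empty).modify (pvTyp p) [] (fun l => l ++ [p]))) d := by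
  induction ps generalizing d with
  | nil => rfl
  | cons q qs ih => simp [List.foldl_cons, pvStepA_norm, ih]

theorem pv_keys_fold (ps : List (List (String × String))) :
    (ps.foldl pvStepA PySem.Dict.empty).keys = PySem.List.dedup (ps.map pvSev) := by
  rw [pv_foldl_eq, PySem.Dict.keys_foldl_insert_key]
  simp [PySem.Dict.keys_empty, PySem.Set.update, PySem.List.dedup_eq_ofList,
    PySem.Set.ofList_eq_foldl]

theorem pv_nodup_keys_fold (ps : List (List (String × String))) :
    (ps.foldl pvStepA PySem.Dict.empty).keys.Nodup := by
  rw [pv_foldl_eq]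
  exact PySem.Dict.nodup_keys_foldl_insert_key _ _ _ _ (by simp [PySem.Dict.keys_empty])

theorem pvKey_eq (p : List (String × String)) : pvKey p = (pvSev p, pvTyp p) := rfl

theorem pv_pairs_eq (ps : List (List (String × String))) :
    (ps.map pvKey).zip ps = ps.map (fun p => (pvKey p, p)) := by
  induction ps with
  | nil => rfl
  | cons q qs ih => simp [ih]

theorem pv_types_mem (keys : List (String × String)) (s t : String) :
    t ∈ (keys.filter (fun k => k.1 == s)).map (·.2) ↔ (s, t) ∈ keys := by
  constructor
  · rintro h
    rcases List.mem_map.mp h with ⟨k, hk, rfl⟩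
    rcases List.mem_filter.mp hk with ⟨hk1, hk2⟩
    have : k.1 = s := by simpa using hk2
    have : k = (s, k.2) := by rw [← this]
    rwa [← this]
  · intro h
    exact List.mem_map.mpr ⟨(s, t), List.mem_filter.mpr ⟨h, by simp⟩, rfl⟩

theorem pv_filter_keys_nil (keys : List (String × String)) (s : String)
    (h : s ∉ keys.map (·.1)) : keys.filter (fun k => k.1 == s) = [] := by
  rw [List.filter_eq_nil_iff]
  intro k hk
  simp only [beq_iff_eq]
  intro hks
  exact h (List.mem_map.mpr ⟨k, hk, hks⟩)

theorem pvEntry_nil (ps : List (List (String × String))) (s t : String)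
    (h : (s, t) ∉ ps.map pvKey) :
    pvEntry (ps.map (fun q => (pvKey q, q))) s t = [] := by
  unfold pvEntry
  rw [List.filter_eq_nil_iff.mpr, List.map_nil]
  intro kp hkp
  rcases List.mem_map.mp hkp with ⟨q, hq, rfl⟩
  simp only [beq_iff_eq]
  intro he
  exact h (by rw [← he]; exact List.mem_map.mpr ⟨q, hq, rfl⟩)

theorem pvEntry_append (pr : List ((String × String) × List (String × String)))
    (a b s t : String) (p : List (String × String)) :
    pvEntry (pr ++ [((a, b), p)]) s t
      = pvEntry pr s t ++ (if (a, b) = (s, t) then [p] else []) := by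
  unfold pvEntry
  rw [List.filter_append, List.map_append]
  congr 1
  by_cases h : (a, b) = (s, t) <;> simp [h]

theorem pv_keys_innerB (keys : List (String × String))
    (pairs : List ((String × String) × List (String × String))) (s : String) :
    (PySem.Dict.mk (pvInnerB keys pairs s)).keys
      = PySem.List.dedup ((keys.filter (fun k => k.1 == s)).map (·.2)) := by
  simp only [PySem.Dict.keys, pvInnerB, List.map_map]
  exact List.map_id _

theorem pvInnerB_append_ne (keys : List (String × String))
    (pairs : List ((String × String) × List (String × String)))
    (s t : String) (p : List (String × String)) (s' : String) (h : s' ≠ s) :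
    pvInnerB (keys ++ [(s, t)]) (pairs ++ [((s, t), p)]) s' = pvInnerB keys pairs s' := by
  unfold pvInnerB
  rw [List.filter_append]
  have h1 : List.filter (fun k => k.1 == s') [(s, t)] = [] := by
    have hb : ((s, t).1 == s') = false := by simp [Ne.symm h]
    simp [List.filter, hb]
  rw [h1, List.append_nil]
  apply List.map_congr_left
  intro t' _
  rw [pvEntry_append]
  have hne : ¬ ((s, t) = (s', t')) := fun he => h ((congrArg Prod.fst he).symm)
  rw [if_neg hne, List.append_nil]

theorem pv_inner_step (ps : List (List (String × String))) (p : List (String × String))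
    (s t : String) :
    ((PySem.Dict.mk (pvInnerB (ps.map pvKey) (ps.map (fun q => (pvKey q, q))) s)).modify t []
        (fun l => l ++ [p])).items
      = pvInnerB (ps.map pvKey ++ [(s, t)]) (ps.map (fun q => (pvKey q, q)) ++ [((s, t), p)]) s := by
  set keys := ps.map pvKey with hkeys
  set pairs := ps.map (fun q => (pvKey q, q)) with hpairs
  set types := (keys.filter (fun k => k.1 == s)).map (·.2) with htypes
  set I := PySem.Dict.mk (pvInnerB keys pairs s) with hI
  have hIkeys : I.keys = PySem.List.dedup types := pv_keys_innerB keys pairs s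
  have hInodup : I.keys.Nodup := by rw [hIkeys]; exact PySem.List.nodup_dedup _
  have hfilt : (keys ++ [(s, t)]).filter (fun k => k.1 == s) = keys.filter (fun k => k.1 == s) ++ [(s, t)] := by
    simp [List.filter_append]
  rw [PySem.Dict.modify]
  by_cases ht : t ∈ types
  · -- t already present in the inner dict
    have hc : I.contains t = true := by
      rw [PySem.Dict.contains_iff_mem_keys, hIkeys, PySem.List.mem_dedup]; exact ht
    have hmem : (t, pvEntry pairs s t) ∈ I.items := by
      show _ ∈ pvInnerB keys pairs s
      exact List.mem_map.mpr ⟨t, (PySem.List.mem_dedup _ _).mpr ht, rfl⟩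
    have hgd : I.getD t [] = pvEntry pairs s t := PySem.Dict.getD_of_mem_items I hmem hInodup []
    rw [hgd, PySem.Dict.items_insert_of_contains _ _ hc]
    show (pvInnerB keys pairs s).map _ = _
    unfold pvInnerB
    rw [hfilt, List.map_append]
    simp only [List.map_cons, List.map_nil]
    rw [← htypes, pv_dedup_append_singleton, if_pos ht, List.map_map]
    apply List.map_congr_left
    intro t' ht'
    by_cases he : t' = t
    · subst he
      simp only [Function.comp, beq_self_eq_true, if_pos]
      rw [pvEntry_append, if_pos rfl]
    · simp only [Function.comp, beq_iff_eq, he, if_false]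
      rw [pvEntry_append, if_neg (fun hh => he (congrArg Prod.snd hh).symm), List.append_nil]
  · -- fresh type key: appended at the end
    have hc : I.contains t = false := by
      rw [← Bool.not_eq_true, PySem.Dict.contains_iff_mem_keys, hIkeys, PySem.List.mem_dedup]
      exact ht
    have hgd : I.getD t [] = [] := PySem.Dict.getD_of_not_contains _ _ hc
    rw [hgd, PySem.Dict.items_insert_of_not_contains _ _ hc]
    show pvInnerB keys pairs s ++ _ = _
    unfold pvInnerB
    rw [hfilt, List.map_append]
    simp only [List.map_cons, List.map_nil]
    rw [← htypes, pv_dedup_append_singleton, if_neg ht, List.map_append]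
    congr 1
    · apply List.map_congr_left
      intro t' ht'
      have he : t' ≠ t := fun h => ht (h ▸ (PySem.List.mem_dedup _ _).mp ht')
      rw [pvEntry_append, if_neg (fun hh => he.symm (congrArg Prod.snd hh)), List.append_nil]
    · have hnk : (s, t) ∉ keys := fun h => ht ((pv_types_mem keys s t).mpr h)
      simp only [List.map_cons, List.map_nil]
      rw [pvEntry_append, if_pos rfl, pvEntry_nil ps s t (by rwa [← hkeys]), List.nil_append]

theorem pvMain (ps : List (List (String × String))) :
    ((ps.foldl pvStepA PySem.Dict.empty).items).map (fun si => (si.1, si.2.items))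
      = (PySem.List.dedup ((ps.map pvKey).map (·.1))).map
          (fun s => (s, pvInnerB (ps.map pvKey) ((ps.map pvKey).zip ps) s)) := by
  rw [pv_pairs_eq]
  induction ps using List.reverseRecOn with
  | nil => rfl
  | append_singleton ps p ih =>
    rw [List.foldl_append, List.foldl_cons, List.foldl_nil, pvStepA_norm]
    have hK : (ps ++ [p]).map pvKey = ps.map pvKey ++ [(pvSev p, pvTyp p)] := by
      simp [pvKey_eq]
    have hP : (ps ++ [p]).map (fun q => (pvKey q, q))
        = ps.map (fun q => (pvKey q, q)) ++ [((pvSev p, pvTyp p), p)] := by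
      simp [pvKey_eq]
    rw [hK, hP]
    set G := ps.foldl pvStepA PySem.Dict.empty with hG
    set keys := ps.map pvKey with hkeys
    set pairs := ps.map (fun q => (pvKey q, q)) with hpairs
    set s := pvSev p with hs0
    set t := pvTyp p with ht0
    have hsevsK : (keys ++ [(s, t)]).map (·.1) = keys.map (·.1) ++ [s] := by simp
    have hsevs : ps.map pvSev = keys.map (·.1) := by
      rw [hkeys, List.map_map]; rfl
    have hkeysfold : G.keys = PySem.List.dedup (keys.map (·.1)) := by
      rw [hG, pv_keys_fold, hsevs]
    have hnd : G.keys.Nodup := pv_nodup_keys_fold ps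
    have hitems : G.items
        = (PySem.List.dedup (keys.map (·.1))).map
            (fun s' => (s', PySem.Dict.mk (pvInnerB keys pairs s'))) := by
      have h2 := congrArg (List.map
        (fun e : String × List (String × List (List (String × String))) =>
          (e.1, PySem.Dict.mk e.2))) ih
      rw [List.map_map, List.map_map] at h2
      have h3 : List.map ((fun e : String × List (String × List (List (String × String))) =>
            (e.1, PySem.Dict.mk e.2)) ∘
          (fun si : String × PySem.Dict String (List (List (String × String))) =>
            (si.1, si.2.items))) G.items = G.items := List.map_id _
      rw [h3] at h2
      exact h2
    rw [hsevsK, pv_dedup_append_singleton]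
    by_cases hsmem : s ∈ keys.map (·.1)
    · -- severity already present: in-place update of its entry
      have hc : G.contains s = true := by
        rw [PySem.Dict.contains_iff_mem_keys, hkeysfold, PySem.List.mem_dedup]; exact hsmem
      have hmemit : (s, PySem.Dict.mk (pvInnerB keys pairs s)) ∈ G.items := by
        rw [hitems]
        exact List.mem_map.mpr ⟨s, (PySem.List.mem_dedup _ _).mpr hsmem, rfl⟩
      have hGsD : G.getD s PySem.Dict.empty = PySem.Dict.mk (pvInnerB keys pairs s) :=
        PySem.Dict.getD_of_mem_items G hmemit hnd PySem.Dict.empty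
      rw [if_pos hsmem, hGsD, PySem.Dict.items_insert_of_contains _ _ hc, hitems,
        List.map_map, List.map_map]
      apply List.map_congr_left
      intro s' hs'
      by_cases he : s' = s
      · subst he
        simp only [Function.comp, beq_self_eq_true, if_pos]
        exact Prod.ext rfl (pv_inner_step ps p s t)
      · simp only [Function.comp, beq_iff_eq, he, if_false]
        exact Prod.ext rfl (pvInnerB_append_ne keys pairs s t p s' he).symm
    · -- fresh severity: appended at the end
      have hc : G.contains s = false := by
        rw [← Bool.not_eq_true, PySem.Dict.contains_iff_mem_keys, hkeysfold,
          PySem.List.mem_dedup]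
        exact hsmem
      have hGsD : G.getD s PySem.Dict.empty = PySem.Dict.empty :=
        PySem.Dict.getD_of_not_contains _ _ hc
      rw [if_neg hsmem, hGsD, PySem.Dict.items_insert_of_not_contains _ _ hc,
        List.map_append, ih, List.map_append]
      congr 1
      · apply List.map_congr_left
        intro s' hs'
        have he : s' ≠ s := fun h => hsmem (h ▸ (PySem.List.mem_dedup _ _).mp hs')
        exact Prod.ext rfl (pvInnerB_append_ne keys pairs s t p s' he).symm
      · simp only [List.map_cons, List.map_nil]
        have hnewI : (PySem.Dict.empty.modify t [] (fun l => l ++ [p]))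
            = PySem.Dict.mk [(t, [p])] := rfl
        rw [hnewI]
        have hfilt : (keys ++ [(s, t)]).filter (fun k => k.1 == s)
            = [(s, t)] := by
          rw [List.filter_append, pv_filter_keys_nil keys s hsmem]
          simp
        have hnk : (s, t) ∉ keys := fun h => hsmem (List.mem_map.mpr ⟨(s, t), h, rfl⟩)
        unfold pvInnerB
        rw [hfilt]
        simp only [List.map_cons, List.map_nil]
        have : PySem.List.dedup [t] = [t] := rfl
        rw [this]
        simp only [List.map_cons, List.map_nil]
        rw [pvEntry_append, if_pos rfl, pvEntry_nil ps s t (by rwa [← hkeys]), List.nil_append]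

-- ===== VERDICT (by name: the statement is the Claim_ definition above) =====
theorem group_problems_py_spec : Claim_equal_group_problems_py := by
  intro problems _
  unfold Spec_group_problems_py group_problems_py group_problems_py_alt
  exact pvMain problems
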